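-- pv_equiv track=rewrite | github.com/Algo-Study-haban/weekly-algorithm | 11주차/이연걸/디펜스게임.py | solution
-- ===== SOURCE A (Python) =====
-- from heapq import heappush, heappop
--
-- def solution(n, k, enemy):
--     # 4
--     # 4 2
--     # 4 4 2 -> 4 2
--     # 5 4 2 -> 4 2
--     # 4 3 2 -> 3 2
--     # 3 3 2 -> ë
--     heap = []
--     length, total = len(enemy), 0
--     for i in range(length):
--         heappush(heap, enemy[i] * -1)
--         total += enemy[i]
--
--         if n < total:
--             if k > 0:
--                 total -= heappop(heap) * -1
--                 k -= 1
--             else: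
--                 return i
--     return length
-- ===== SOURCE B (Python) =====
-- def solution(n, k, enemy):
--     kept, total, i = [], 0, 0
--     while True:
--         while i < len(enemy):            # scan phase: advance until the budget overflows
--             kept.append(enemy[i])
--             total += enemy[i]
--             i += 1
--             if total > n:
--                 break
--         else:
--             return len(enemy)            # scanned everything without an unpayable overflow
--         if k <= 0:
--             return i - 1                 # overflow with no special ammo left
--         k -= 1                           # spend one special ammo on the biggest wave so far
--         big = max(kept)
--         kept.remove(big)
--         total -= big
-- ===== Notes on version B (the rewrite author's own statement) =====
-- stated objective: alternative
-- what changed: Replaces A's single per-element loop with a negated max-heap by a phase-structured simulation: an inner scan loop advances until the running total overflows n, and only then the outer loop spends a special ammo by taking max() of a plain unordered list of kept waves and removing it (no heap, no negation trick, no per-element priority maintenance); the greedy choice itself (pay the largest wave seen so far on overflow) is forced by A's exact semantics, including lists with negative entries where the keep-k-largest reformulation diverges.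
import Mathlib
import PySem

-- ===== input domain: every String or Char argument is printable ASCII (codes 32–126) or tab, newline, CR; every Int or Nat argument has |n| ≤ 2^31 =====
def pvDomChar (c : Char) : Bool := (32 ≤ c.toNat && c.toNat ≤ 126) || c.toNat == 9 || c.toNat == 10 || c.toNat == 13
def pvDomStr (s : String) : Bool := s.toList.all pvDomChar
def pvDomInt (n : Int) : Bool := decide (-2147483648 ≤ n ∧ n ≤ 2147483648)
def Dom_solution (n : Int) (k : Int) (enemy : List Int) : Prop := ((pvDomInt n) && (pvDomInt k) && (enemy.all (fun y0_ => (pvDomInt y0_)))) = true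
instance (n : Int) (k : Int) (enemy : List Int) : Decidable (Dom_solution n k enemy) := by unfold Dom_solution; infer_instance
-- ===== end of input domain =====

-- B replaces A's single-pass negated max-heap with phase-structured scanning: an inner
-- scan advances until the budget overflows, then the outer loop spends one special ammo
-- on max() of a plain list of the waves kept so far (objective: alternative).


-- ===== PORT A =====
-- heapq is modelled by the multiset it holds: heappush appends, heappop removes and
-- returns the minimum element. Exact for this program: only the values returned by
-- heappop are observable, and heappop always returns the heap's minimum.
def pyHeapPush (heap : List Int) (x : Int) : List Int := heap ++ [x]

def pyHeapPop (heap : List Int) : Int × List Int :=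
  match heap.min? with
  | some m => (m, heap.erase m)
  | none => (0, heap)   -- unreachable here: A pops only right after a push

-- the loop of A; i counts processed waves, so at the end i = len(enemy) (A's `return length`)
def solutionGo (n : Int) (k : Int) (heap : List Int) (total : Int) (i : Int) :
    List Int → Int
  | [] => i
  | e :: rest =>
    let heap' := pyHeapPush heap (e * (-1))
    let total' := total + e
    if n < total' then
      if k > 0 then
        let p := pyHeapPop heap'
        solutionGo n (k - 1) p.2 (total' - p.1 * (-1)) (i + 1) rest
      else i
    else solutionGo n k heap' total' (i + 1) rest

def solution (n : Int) (k : Int) (enemy : List Int) : Int :=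
  solutionGo n k [] 0 0 enemy

-- ===== PORT B =====
-- B's inner `while` scan: append waves to `kept` and accumulate `total` until either the
-- list is exhausted (none = the while/else `return len(enemy)` path) or total > n
-- (some (kept', total', i', rest) = the `break`).
def scanPhase (n : Int) (kept : List Int) (total : Int) (i : Int) :
    List Int → Option (List Int × Int × Int × List Int)
  | [] => none
  | e :: rest =>
    let kept' := kept ++ [e]
    let total' := total + e
    let i' := i + 1
    if n < total' then some (kept', total', i', rest) else scanPhase n kept' total' i' rest

lemma scanPhase_lt (l : List Int) : ∀ (n total i : Int) (kept : List Int) (r : List Int × Int × Int × List Int),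
    scanPhase n kept total i l = some r → r.2.2.2.length < l.length := by
  induction l with
  | nil => intro n total i kept r h; simp [scanPhase] at h
  | cons e rest ih =>
    intro n total i kept r h
    simp only [scanPhase] at h
    split at h
    · cases h; simp
    · exact Nat.lt_trans (ih _ _ _ _ _ h) (by simp)

-- B's outer `while True` loop: run a scan phase; on exhaustion return len(enemy) (passed
-- in as lenE); on overflow either die (k <= 0) or remove max(kept) and continue.
def altOuter (n : Int) (k : Int) (kept : List Int) (total : Int) (i : Int)
    (rem : List Int) (lenE : Int) : Int :=
  match h : scanPhase n kept total i rem with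
  | none => lenE
  | some (kept', total', i', rest) =>
    if k ≤ 0 then i' - 1
    else
      let big := kept'.max?.getD 0   -- kept' is nonempty at an overflow, so getD is never used
      altOuter n (k - 1) (kept'.erase big) (total' - big) i' rest lenE
termination_by rem.length
decreasing_by exact scanPhase_lt _ _ _ _ _ _ h

def solution_alt (n : Int) (k : Int) (enemy : List Int) : Int :=
  altOuter n k [] 0 0 enemy (enemy.length : Int)

-- ===== PRECONDITION & SPEC =====
def Spec_solution (n : Int) (k : Int) (enemy : List Int) (out : Int) : Prop := out = solution_alt n k enemy
instance (n : Int) (k : Int) (enemy : List Int) (out : Int) : Decidable (Spec_solution n k enemy out) := by unfold Spec_solution; infer_instance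

-- ===== CLAIM (what is proved, stated in full; the proofs are below) =====
def Claim_equal_solution : Prop := ∀ (n : Int) (k : Int) (enemy : List Int), Dom_solution n k enemy → Spec_solution n k enemy (solution n k enemy)

-- ===== LEMMAS AND PROOFS =====

-- the two loops agree, given that A's heap (negated) holds the same multiset as B's kept list
lemma go_eq (rem : List Int) : ∀ (n k total i lenE : Int) (heap kept : List Int),
    (heap.map (fun x => -x)).Perm kept → lenE = i + (rem.length : Int) →
    solutionGo n k heap total i rem = altOuter n k kept total i rem lenE := by
  induction rem with
  | nil =>
    intro n k total i lenE heap kept hperm hlen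
    rw [altOuter.eq_def]
    simp only [scanPhase, solutionGo]
    simp at hlen; omega
  | cons e rest ih =>
    intro n k total i lenE heap kept hperm hlen
    have hlen' : lenE = (i + 1) + (rest.length : Int) := by simp at hlen; omega
    have hperm' : ((pyHeapPush heap (e * (-1))).map (fun x => -x)).Perm (kept ++ [e]) := by
      simp only [pyHeapPush, List.map_append, List.map_cons, List.map_nil, mul_neg_one, neg_neg]
      exact hperm.append_right [e]
    by_cases hlt : n < total + e
    · -- overflow at e: B's scan phase breaks here
      have hR : altOuter n k kept total i (e :: rest) lenE =
          if k ≤ 0 then (i + 1) - 1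
          else altOuter n (k - 1) ((kept ++ [e]).erase ((kept ++ [e]).max?.getD 0))
                 ((total + e) - (kept ++ [e]).max?.getD 0) (i + 1) rest lenE := by
        rw [altOuter.eq_def]
        simp only [scanPhase]
        rw [if_pos hlt]
      rw [hR]
      simp only [solutionGo, if_pos hlt]
      by_cases hk : k > 0
      · have hk' : ¬ (k ≤ 0) := by omega
        rw [if_neg hk', if_pos hk]
        -- the popped value: v = max(kept ++ [e]) = -min(heap ++ [-e])
        have hne : kept ++ [e] ≠ [] := by simp
        obtain ⟨v, hv⟩ : ∃ v, (kept ++ [e]).max? = some v := by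
          cases h : (kept ++ [e]).max? with
          | none => exact absurd (List.max?_eq_none_iff.mp h) hne
          | some v => exact ⟨v, rfl⟩
        obtain ⟨hvmem, hvmax⟩ := List.max?_eq_some_iff.mp hv
        have hnegmem : -v ∈ pyHeapPush heap (e * (-1)) := by
          have : v ∈ (pyHeapPush heap (e * (-1))).map (fun x => -x) := hperm'.symm.subset hvmem
          rcases List.mem_map.mp this with ⟨a, ha, hav⟩
          have : a = -v := by omega
          rwa [this] at ha
        have hmin : (pyHeapPush heap (e * (-1))).min? = some (-v) := by
          rw [List.min?_eq_some_iff]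
          refine ⟨hnegmem, ?_⟩
          intro b hb
          have : -b ∈ kept ++ [e] := hperm'.subset (List.mem_map.mpr ⟨b, hb, rfl⟩)
          have := hvmax _ this
          omega
        have hpop : pyHeapPop (pyHeapPush heap (e * (-1))) =
            (-v, (pyHeapPush heap (e * (-1))).erase (-v)) := by
          unfold pyHeapPop; rw [hmin]
        rw [hpop, hv]
        simp only [Option.getD_some]
        rw [show total + e - -v * (-1) = total + e - v from by ring]
        -- re-establish the invariant after the removal
        apply ih _ _ _ _ _ _ _ _ hlen'
        have hinj : Function.Injective (fun x : Int => -x) := fun a b h => by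
          simpa using congrArg Neg.neg h
        have h1 : (((pyHeapPush heap (e * (-1))).erase (-v)).map (fun x => -x)) =
            (((pyHeapPush heap (e * (-1))).map (fun x => -x)).erase v) := by
          have := List.map_erase (f := fun x : Int => -x) hinj (a := -v)
            (pyHeapPush heap (e * (-1)))
          simpa using this
        rw [h1]
        exact hperm'.erase v
      · have hk' : k ≤ 0 := by omega
        rw [if_neg hk, if_pos hk']
        omega
    · -- no overflow: B's inner scan continues with the next element
      have hstep : altOuter n k kept total i (e :: rest) lenE =
          altOuter n k (kept ++ [e]) (total + e) (i + 1) rest lenE := by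
        rw [altOuter.eq_def]
        conv_rhs => rw [altOuter.eq_def]
        simp only [scanPhase]
        rw [if_neg hlt]
      rw [hstep]
      simp only [solutionGo, if_neg hlt]
      exact ih n k (total + e) (i + 1) lenE _ _ hperm' hlen'

-- ===== VERDICT (by name: the statement is the Claim_ definition above) =====
theorem solution_spec : Claim_equal_solution := by
  intro n k enemy _
  unfold Spec_solution solution solution_alt
  exact go_eq enemy n k 0 0 (enemy.length : Int) [] [] (by simp) (by simp)
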